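-- pv_equiv track=rewrite | github.com/shivamar/Online_Set_Cover-Problem | online_set_cover.py | addAtmost4LogNSets
-- ===== SOURCE A (Python) =====
-- def addAtmost4LogNSets(final_subset, sample_subsets, modified_tuples, max_num_additions, new_wj, wj, updated_phi_vector, phi_vector,input_set):
--
-- #limit max_num_additions to final_subset
-- #check if sum(updated_phi) > sum(phi)
-- #randomly select a modified tuple and add to final Set
-- #for each element in modified tuple check if it is in input_set, if yes remove it and
-- #update the phi vector by removing that entry
-- #remove it from sample_subsets
--     for x in range(max_num_additions):
--         if x < len(modified_tuples):
--             phi_e = sum(updated_phi_vector.values())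
--             phi_o = sum(phi_vector.values())
--
--             if phi_e > phi_o:
--                 tup = tuple(modified_tuples[x])
--                 final_subset.append(tup)
--                 del sample_subsets[tup]
--
--                 for element in tup:
--                     if element in input_set:
--                         input_set.remove(element)
--                         del updated_phi_vector[element]
--
--     return final_subset,updated_phi_vector,input_set,sample_subsets
-- ===== SOURCE B (Python) =====
-- def addAtmost4LogNSets(final_subset, sample_subsets, modified_tuples, max_num_additions, new_wj, wj, updated_phi_vector, phi_vector, input_set):
--     # Functional rewrite with an early break: phi_o is summed once, phi_e is
--     # maintained incrementally, and the scan STOPS at the first failing phi test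
--     # (sound: phi_e changes only when the test passes, so once false it stays
--     # false in A too).  Fresh containers are returned; A mutates its arguments
--     # in place, so the equivalence is about the return value.
--     phi_o = sum(phi_vector.values())
--     phi_e = sum(updated_phi_vector.values())
--     upd = dict(updated_phi_vector)
--     samp = dict(sample_subsets)
--     inp = set(input_set)
--     added = []
--     for t in modified_tuples[:max(0, max_num_additions)]:
--         if phi_e <= phi_o:
--             break
--         tup = tuple(t)
--         added.append(tup)
--         del samp[tup]
--         for element in tup:
--             if element in inp:
--                 inp.discard(element)
--                 phi_e -= upd.pop(element)
--     return final_subset + added, upd, inp, samp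
-- ===== Notes on version B (the rewrite author's own statement) =====
-- stated objective: faster
-- what changed: B sums phi_vector once and maintains updated_phi_vector's sum incrementally while scanning only modified_tuples[:max_num_additions] and breaking at the first failing phi test, returning freshly built containers, instead of A's loop over range(max_num_additions) that re-sums both whole dicts and re-tests on every iteration.
import Mathlib
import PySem

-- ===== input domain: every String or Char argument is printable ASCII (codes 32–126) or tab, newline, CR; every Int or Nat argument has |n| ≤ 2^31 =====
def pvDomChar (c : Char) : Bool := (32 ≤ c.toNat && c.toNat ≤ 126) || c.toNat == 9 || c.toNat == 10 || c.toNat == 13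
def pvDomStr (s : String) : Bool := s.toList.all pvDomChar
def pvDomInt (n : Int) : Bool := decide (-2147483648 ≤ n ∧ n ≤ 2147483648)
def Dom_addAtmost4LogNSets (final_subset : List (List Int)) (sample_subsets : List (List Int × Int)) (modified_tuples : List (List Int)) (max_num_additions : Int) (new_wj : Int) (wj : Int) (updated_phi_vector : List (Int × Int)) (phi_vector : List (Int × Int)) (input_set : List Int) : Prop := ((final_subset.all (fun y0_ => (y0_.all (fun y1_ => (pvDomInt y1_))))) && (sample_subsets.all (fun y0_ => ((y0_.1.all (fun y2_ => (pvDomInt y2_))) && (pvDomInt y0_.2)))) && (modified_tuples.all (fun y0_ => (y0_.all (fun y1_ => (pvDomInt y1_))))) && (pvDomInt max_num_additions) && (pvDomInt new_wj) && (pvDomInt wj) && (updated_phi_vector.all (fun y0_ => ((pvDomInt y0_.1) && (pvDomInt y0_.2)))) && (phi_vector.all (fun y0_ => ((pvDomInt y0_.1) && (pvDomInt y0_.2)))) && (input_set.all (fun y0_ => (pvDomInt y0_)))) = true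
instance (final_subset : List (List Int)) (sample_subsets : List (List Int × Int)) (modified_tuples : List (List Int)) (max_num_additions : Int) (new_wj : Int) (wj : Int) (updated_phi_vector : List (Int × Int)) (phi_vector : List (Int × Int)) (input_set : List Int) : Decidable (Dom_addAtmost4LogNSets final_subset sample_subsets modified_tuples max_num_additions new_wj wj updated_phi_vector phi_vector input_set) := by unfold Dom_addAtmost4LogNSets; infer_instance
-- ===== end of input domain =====

-- B is faster: it sums phi_vector once, maintains updated_phi_vector's sum incrementally and
-- stops at the first failing phi test while scanning only modified_tuples[:max_num_additions];
-- A mutates its dict/list/set arguments in place while B builds fresh containers, so the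
-- equivalence proved here is about the return value.

-- ===== PORT A =====
-- loop state: (final_subset, sample_subsets dict, updated_phi_vector dict, input_set)
-- inner 'for element in tup' body: guarded input_set.remove(element); del updated_phi_vector[element]
-- (Python raises KeyError on a missing dict key in the unguarded del — those inputs are outside Pre_;
-- Dict.erase is then a no-op, Set.remove? is guarded so always fires).
def pvAElem (st : List (List Int) × PySem.Dict (List Int) Int × PySem.Dict Int Int × List Int)
    (element : Int) :
    List (List Int) × PySem.Dict (List Int) Int × PySem.Dict Int Int × List Int :=
  if PySem.Set.contains st.2.2.2 element then
    (st.1, st.2.1, PySem.Dict.erase st.2.2.1 element,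
     (PySem.Set.remove? st.2.2.2 element).getD st.2.2.2)
  else st

-- one iteration 'for x in range(max_num_additions)' of A: re-sums both dicts each time
def pvABody (modified_tuples : List (List Int)) (phi_vector : PySem.Dict Int Int)
    (st : List (List Int) × PySem.Dict (List Int) Int × PySem.Dict Int Int × List Int) (x : Int) :
    List (List Int) × PySem.Dict (List Int) Int × PySem.Dict Int Int × List Int :=
  if x < PySem.List.len modified_tuples then
    let phi_e := (PySem.Dict.values st.2.2.1).sum
    let phi_o := (PySem.Dict.values phi_vector).sum
    if phi_e > phi_o then
      let tup := PySem.List.pyGetD modified_tuples x []   -- guarded by 0 ≤ x < len, exact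
      tup.foldl pvAElem (st.1 ++ [tup], PySem.Dict.erase st.2.1 tup, st.2.2.1, st.2.2.2)
    else st
  else st

def addAtmost4LogNSets (final_subset : List (List Int)) (sample_subsets : List (List Int × Int)) (modified_tuples : List (List Int)) (max_num_additions : Int) (new_wj : Int) (wj : Int) (updated_phi_vector : List (Int × Int)) (phi_vector : List (Int × Int)) (input_set : List Int) : List (List Int) × (List (Int × Int)) × List Int × (List (List Int × Int)) :=
  let st := (PySem.List.pyRange 0 max_num_additions 1).foldl
    (pvABody modified_tuples (PySem.Dict.mk phi_vector))
    (final_subset, PySem.Dict.mk sample_subsets, PySem.Dict.mk updated_phi_vector, input_set)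
  (st.1, (st.2.2.1).items, st.2.2.2, (st.2.1).items)

-- ===== PORT B =====
-- inner loop 'for element in tup': inp.discard(element); phi_e -= upd.pop(element)
-- (upd.pop on a missing key raises KeyError in Python — outside Pre_; the port then
-- leaves upd and phi_e unchanged)
def pvBInner (upd : PySem.Dict Int Int) (inp : List Int) (phi_e : Int) :
    List Int → PySem.Dict Int Int × List Int × Int
  | [] => (upd, inp, phi_e)
  | e :: rest =>
    if PySem.Set.contains inp e then
      match PySem.Dict.pop? upd e with
      | some (v, upd') => pvBInner upd' (PySem.Set.discard inp e) (phi_e - v) rest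
      | none => pvBInner upd (PySem.Set.discard inp e) phi_e rest
    else pvBInner upd inp phi_e rest

-- the 'for t in modified_tuples[:max(0, mx)]' loop with its early 'break'
def pvBGo (phi_o : Int) (added : List (List Int)) (samp : PySem.Dict (List Int) Int)
    (upd : PySem.Dict Int Int) (inp : List Int) (phi_e : Int) :
    List (List Int) → List (List Int) × PySem.Dict (List Int) Int × PySem.Dict Int Int × List Int
  | [] => (added, samp, upd, inp)
  | t :: rest =>
    if phi_e ≤ phi_o then (added, samp, upd, inp)
    else
      let r := pvBInner upd inp phi_e t
      pvBGo phi_o (added ++ [t]) (PySem.Dict.erase samp t) r.1 r.2.1 r.2.2 rest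

def addAtmost4LogNSets_alt (final_subset : List (List Int)) (sample_subsets : List (List Int × Int)) (modified_tuples : List (List Int)) (max_num_additions : Int) (new_wj : Int) (wj : Int) (updated_phi_vector : List (Int × Int)) (phi_vector : List (Int × Int)) (input_set : List Int) : List (List Int) × (List (Int × Int)) × List Int × (List (List Int × Int)) :=
  let phi_o := (PySem.Dict.values (PySem.Dict.mk phi_vector)).sum
  let phi_e := (PySem.Dict.values (PySem.Dict.mk updated_phi_vector)).sum
  let r := pvBGo phi_o [] (PySem.Dict.mk sample_subsets) (PySem.Dict.mk updated_phi_vector)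
    input_set phi_e (PySem.List.slice modified_tuples none (some (max 0 max_num_additions)))
  (final_subset ++ r.1, (r.2.2.1).items, r.2.2.2, (r.2.1).items)

-- ===== PRECONDITION & SPEC =====
-- Pre_ excludes (a) association lists with duplicate dict keys (a Python dict never has them; on such
-- lists the dict convention is ambiguous), and (b) inputs on which the unguarded 'del sample_subsets[tup]'
-- or 'updated_phi_vector.pop(element)' hits a missing key, where BOTH A and B raise KeyError; the safety
-- disjunct is sufficient rather than exact, so a few inputs where A happens to return (a later tuple
-- missing from sample_subsets but never reached because the phi test already failed) are also excluded.
def Pre_addAtmost4LogNSets (final_subset : List (List Int)) (sample_subsets : List (List Int × Int)) (modified_tuples : List (List Int)) (max_num_additions : Int) (new_wj : Int) (wj : Int) (updated_phi_vector : List (Int × Int)) (phi_vector : List (Int × Int)) (input_set : List Int) : Prop :=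
  (updated_phi_vector.map Prod.fst).Nodup ∧
  (phi_vector.map Prod.fst).Nodup ∧
  (sample_subsets.map Prod.fst).Nodup ∧
  (min max_num_additions.toNat modified_tuples.length = 0 ∨
   (updated_phi_vector.map Prod.snd).sum ≤ (phi_vector.map Prod.snd).sum ∨
   ((modified_tuples.take (min max_num_additions.toNat modified_tuples.length)).Nodup ∧
    (∀ t ∈ modified_tuples.take (min max_num_additions.toNat modified_tuples.length),
       t ∈ sample_subsets.map Prod.fst) ∧
    (∀ e ∈ input_set, e ∈ updated_phi_vector.map Prod.fst)))
instance (final_subset : List (List Int)) (sample_subsets : List (List Int × Int)) (modified_tuples : List (List Int)) (max_num_additions : Int) (new_wj : Int) (wj : Int) (updated_phi_vector : List (Int × Int)) (phi_vector : List (Int × Int)) (input_set : List Int) : Decidable (Pre_addAtmost4LogNSets final_subset sample_subsets modified_tuples max_num_additions new_wj wj updated_phi_vector phi_vector input_set) := by unfold Pre_addAtmost4LogNSets; infer_instance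

def pvWitness_addAtmost4LogNSets : List (List Int) × (List (List Int × Int)) × List (List Int) × Int × Int × Int × (List (Int × Int)) × (List (Int × Int)) × List Int :=
  ([], [([1], 2)], [[1]], 1, 0, 0, [(1, 5)], [(1, 1)], [1])

def Spec_addAtmost4LogNSets (final_subset : List (List Int)) (sample_subsets : List (List Int × Int)) (modified_tuples : List (List Int)) (max_num_additions : Int) (new_wj : Int) (wj : Int) (updated_phi_vector : List (Int × Int)) (phi_vector : List (Int × Int)) (input_set : List Int) (out : List (List Int) × (List (Int × Int)) × List Int × (List (List Int × Int))) : Prop := out = addAtmost4LogNSets_alt final_subset sample_subsets modified_tuples max_num_additions new_wj wj updated_phi_vector phi_vector input_set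
instance (final_subset : List (List Int)) (sample_subsets : List (List Int × Int)) (modified_tuples : List (List Int)) (max_num_additions : Int) (new_wj : Int) (wj : Int) (updated_phi_vector : List (Int × Int)) (phi_vector : List (Int × Int)) (input_set : List Int) (out : List (List Int) × (List (Int × Int)) × List Int × (List (List Int × Int))) : Decidable (Spec_addAtmost4LogNSets final_subset sample_subsets modified_tuples max_num_additions new_wj wj updated_phi_vector phi_vector input_set out) := by unfold Spec_addAtmost4LogNSets; infer_instance

-- ===== CLAIM =====
def Claim_equal_addAtmost4LogNSets : Prop := ∀ (final_subset : List (List Int)) (sample_subsets : List (List Int × Int)) (modified_tuples : List (List Int)) (max_num_additions : Int) (new_wj : Int) (wj : Int) (updated_phi_vector : List (Int × Int)) (phi_vector : List (Int × Int)) (input_set : List Int), Dom_addAtmost4LogNSets final_subset sample_subsets modified_tuples max_num_additions new_wj wj updated_phi_vector phi_vector input_set → Pre_addAtmost4LogNSets final_subset sample_subsets modified_tuples max_num_additions new_wj wj updated_phi_vector phi_vector input_set → Spec_addAtmost4LogNSets final_subset sample_subsets modified_tuples max_num_additions new_wj wj updated_phi_vector phi_vector input_set (addAtmost4LogNSets final_subset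 sample_subsets modified_tuples max_num_additions new_wj wj updated_phi_vector phi_vector input_set)

-- ===== LEMMAS AND PROOFS =====

-- A's per-tuple step once the range index is known to be in bounds (phi_o is the constant
-- sum of phi_vector's values; A re-sums updated_phi_vector from the dict each time)
def pvAStep (phi_o : Int)
    (st : List (List Int) × PySem.Dict (List Int) Int × PySem.Dict Int Int × List Int)
    (t : List Int) :
    List (List Int) × PySem.Dict (List Int) Int × PySem.Dict Int Int × List Int :=
  if (PySem.Dict.values st.2.2.1).sum > phi_o then
    t.foldl pvAElem (st.1 ++ [t], PySem.Dict.erase st.2.1 t, st.2.2.1, st.2.2.2)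
  else st

theorem pvSumErase (l : List (Int × Int)) (e : Int) (pv : Int × Int)
    (hnd : (l.map Prod.fst).Nodup) (h : l.find? (fun p => p.1 == e) = some pv) :
    ((l.filter (fun p => !(p.1 == e))).map (fun p => p.2)).sum = (l.map (fun p => p.2)).sum - pv.2 := by
  induction l with
  | nil => simp at h
  | cons a t ih =>
    simp only [List.map_cons, List.nodup_cons] at hnd
    by_cases ha : a.1 = e
    · rw [List.find?_cons_of_pos (by simp [ha])] at h
      obtain rfl : a = pv := by injection h
      have hkeep : t.filter (fun p => !(p.1 == e)) = t := by
        rw [List.filter_eq_self]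
        intro p hp
        simp only [Bool.not_eq_eq_eq_not, Bool.not_true, beq_eq_false_iff_ne, ne_eq]
        intro hpe
        exact hnd.1 (by simpa [← ha, hpe] using List.mem_map_of_mem (f := Prod.fst) hp)
      simp [ha, hkeep]
    · rw [List.find?_cons_of_neg (by simp [ha])] at h
      have := ih hnd.2 h
      simp [ha, this]
      ring

-- the inner loops agree: A's elementwise fold equals B's recursion, B's phi_e stays the
-- dict sum, and nodup keys are preserved
theorem pvInnerEq (tup : List Int) (f : List (List Int)) (s : PySem.Dict (List Int) Int)
    (u : PySem.Dict Int Int) (inp : List Int) (phi_e : Int)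
    (hnd : ((u.items).map Prod.fst).Nodup) (hsum : phi_e = (PySem.Dict.values u).sum) :
    tup.foldl pvAElem (f, s, u, inp)
      = (f, s, (pvBInner u inp phi_e tup).1, (pvBInner u inp phi_e tup).2.1)
    ∧ (pvBInner u inp phi_e tup).2.2 = (PySem.Dict.values (pvBInner u inp phi_e tup).1).sum
    ∧ (((pvBInner u inp phi_e tup).1.items).map Prod.fst).Nodup := by
  induction tup generalizing u inp phi_e with
  | nil => exact ⟨rfl, hsum, hnd⟩
  | cons e rest ih =>
    by_cases hc : PySem.Set.contains inp e
    · have hm : e ∈ inp := (PySem.Set.contains_iff inp e).mp hc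
      have hA : pvAElem (f, s, u, inp) e
          = (f, s, PySem.Dict.erase u e, PySem.Set.discard inp e) := by
        unfold pvAElem
        simp [PySem.Set.remove?, hm]
      rcases hfind : (u.items).find? (fun p => p.1 == e) with _ | pv
      · have herase : PySem.Dict.erase u e = u := by
          apply PySem.Dict.ext
          show (u.items).filter _ = u.items
          rw [List.filter_eq_self]
          intro p hp
          have := List.find?_eq_none.mp hfind p hp
          simpa using this
        have hpop : PySem.Dict.pop? u e = none := by
          simp [PySem.Dict.pop?, PySem.Dict.get?, hfind]
        have hB : pvBInner u inp phi_e (e :: rest)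
            = pvBInner u (PySem.Set.discard inp e) phi_e rest := by
          rw [pvBInner, if_pos hc, hpop]
        rw [List.foldl_cons, hA, herase, hB]
        exact ih u (PySem.Set.discard inp e) phi_e hnd hsum
      · have hsum' : phi_e - pv.2 = (PySem.Dict.values (PySem.Dict.erase u e)).sum := by
          have := pvSumErase (u.items) e pv hnd hfind
          have hv : (PySem.Dict.values u).sum = ((u.items).map (fun p => p.2)).sum := rfl
          show phi_e - pv.2 = (((u.items).filter (fun p => !(p.1 == e))).map (fun p => p.2)).sum
          omega
        have hnd' : (((PySem.Dict.erase u e).items).map Prod.fst).Nodup :=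
          hnd.sublist (List.Sublist.map _ List.filter_sublist)
        have hpop : PySem.Dict.pop? u e = some (pv.2, PySem.Dict.erase u e) := by
          simp [PySem.Dict.pop?, PySem.Dict.get?, hfind]
        have hB : pvBInner u inp phi_e (e :: rest)
            = pvBInner (PySem.Dict.erase u e) (PySem.Set.discard inp e) (phi_e - pv.2) rest := by
          rw [pvBInner, if_pos hc, hpop]
        rw [List.foldl_cons, hA, hB]
        exact ih (PySem.Dict.erase u e) (PySem.Set.discard inp e) (phi_e - pv.2) hnd' hsum'
    · have hA : pvAElem (f, s, u, inp) e = (f, s, u, inp) := by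
        unfold pvAElem; simp only; rw [if_neg hc]
      have hB : pvBInner u inp phi_e (e :: rest) = pvBInner u inp phi_e rest := by
        simp only [pvBInner]; rw [if_neg hc]
      rw [List.foldl_cons, hA, hB]
      exact ih u inp phi_e hnd hsum

-- once the phi test fails A's remaining iterations leave the state unchanged
theorem pvStuck (phi_o : Int) (l : List (List Int)) (f : List (List Int))
    (s : PySem.Dict (List Int) Int) (u : PySem.Dict Int Int) (inp : List Int)
    (hle : (PySem.Dict.values u).sum ≤ phi_o) :
    l.foldl (pvAStep phi_o) (f, s, u, inp) = (f, s, u, inp) := by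
  induction l with
  | nil => rfl
  | cons t rest ih =>
    rw [List.foldl_cons, show pvAStep phi_o (f, s, u, inp) t = (f, s, u, inp) by
      unfold pvAStep; simp only; rw [if_neg (by simpa using not_lt.mpr hle)]]
    exact ih

-- A's skip-loop over the truncated tuple list equals B's break-recursion
theorem pvGoEq (phi_o : Int) (l : List (List Int)) (f0 added : List (List Int))
    (s : PySem.Dict (List Int) Int) (u : PySem.Dict Int Int) (inp : List Int) (phi_e : Int)
    (hnd : ((u.items).map Prod.fst).Nodup) (hsum : phi_e = (PySem.Dict.values u).sum) :
    l.foldl (pvAStep phi_o) (f0 ++ added, s, u, inp)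
      = (f0 ++ (pvBGo phi_o added s u inp phi_e l).1,
         (pvBGo phi_o added s u inp phi_e l).2.1,
         (pvBGo phi_o added s u inp phi_e l).2.2.1,
         (pvBGo phi_o added s u inp phi_e l).2.2.2) := by
  induction l generalizing added s u inp phi_e with
  | nil => rfl
  | cons t rest ih =>
    by_cases hle : phi_e ≤ phi_o
    · rw [show pvBGo phi_o added s u inp phi_e (t :: rest) = (added, s, u, inp) from by
        rw [pvBGo, if_pos hle]]
      rw [List.foldl_cons, show pvAStep phi_o (f0 ++ added, s, u, inp) t = (f0 ++ added, s, u, inp) by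
        unfold pvAStep; simp only; rw [if_neg (by omega)]]
      exact pvStuck phi_o rest _ s u inp (by omega)
    · obtain ⟨h1, h2, h3⟩ := pvInnerEq t (f0 ++ added ++ [t]) (PySem.Dict.erase s t) u inp phi_e hnd hsum
      rw [show pvBGo phi_o added s u inp phi_e (t :: rest)
          = pvBGo phi_o (added ++ [t]) (PySem.Dict.erase s t)
              (pvBInner u inp phi_e t).1 (pvBInner u inp phi_e t).2.1
              (pvBInner u inp phi_e t).2.2 rest from by
        rw [pvBGo, if_neg hle]]
      rw [List.foldl_cons, show pvAStep phi_o (f0 ++ added, s, u, inp) t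
          = t.foldl pvAElem (f0 ++ added ++ [t], PySem.Dict.erase s t, u, inp) by
        unfold pvAStep; simp only; rw [if_pos (by omega)]]
      rw [h1, show f0 ++ added ++ [t] = f0 ++ (added ++ [t]) from List.append_assoc ..]
      exact ih (added ++ [t]) (PySem.Dict.erase s t) _ _ _ h3 h2

-- in-bounds range iterations of A are exactly pvAStep on the indexed tuple
theorem pvBodyStep (mt : List (List Int)) (phiD : PySem.Dict Int Int) (i : Nat)
    (st : List (List Int) × PySem.Dict (List Int) Int × PySem.Dict Int Int × List Int)
    (hi : i < mt.length) :
    pvABody mt phiD st (i : Int) = pvAStep ((PySem.Dict.values phiD).sum) st (mt.getD i []) := by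
  unfold pvABody pvAStep
  have hlt : ((i : Int) < PySem.List.len mt) = True := by
    simp [PySem.List.len_eq]; exact_mod_cast hi
  have hget : PySem.List.pyGetD mt (i : Int) [] = mt.getD i [] := by simp
  dsimp only
  simp only [hlt, if_true, hget]

-- A's fold over the in-bounds range indices is the fold of pvAStep over the tuple slice
theorem pvMain (mt : List (List Int)) (phiD : PySem.Dict Int Int) (c i : Nat)
    (st : List (List Int) × PySem.Dict (List Int) Int × PySem.Dict Int Int × List Int)
    (hc : i + c ≤ mt.length) :
    ((List.range' i c).map (fun (j : Nat) => (j : Int))).foldl (pvABody mt phiD) st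
      = ((mt.drop i).take c).foldl (pvAStep ((PySem.Dict.values phiD).sum)) st := by
  induction c generalizing i st with
  | zero => simp
  | succ c ih =>
    have hi : i < mt.length := by omega
    have hdrop : mt.drop i = mt[i] :: mt.drop (i + 1) := (List.getElem_cons_drop hi).symm
    have hgetD : mt[i] = mt.getD i [] := (List.getD_eq_getElem _ _ hi).symm
    rw [List.range'_succ, hdrop]
    simp only [List.take_succ_cons, List.foldl_cons, List.map_cons, hgetD,
      pvBodyStep mt phiD i st hi]
    exact ih (i + 1) _ (by omega)

-- out-of-bounds range indices leave A's state unchanged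
theorem pvTailId (modified_tuples : List (List Int)) (phiD : PySem.Dict Int Int)
    (js : List Nat) (hj : ∀ j ∈ js, modified_tuples.length ≤ j)
    (st : List (List Int) × PySem.Dict (List Int) Int × PySem.Dict Int Int × List Int) :
    (js.map (fun (j : Nat) => (j : Int))).foldl (pvABody modified_tuples phiD) st = st := by
  induction js generalizing st with
  | nil => rfl
  | cons j t ih =>
    have hj0 := hj j (by simp)
    have hj' : ¬ ((j : Int) < PySem.List.len modified_tuples) := by
      simp only [PySem.List.len_eq, not_lt]
      exact_mod_cast hj0
    rw [List.map_cons, List.foldl_cons,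
      show pvABody modified_tuples phiD st (j : Int) = st by
        unfold pvABody; dsimp only; rw [if_neg hj']]
    exact ih (fun x hx => hj x (by simp [hx])) st

-- ===== VERDICT =====
theorem addAtmost4LogNSets_spec : Claim_equal_addAtmost4LogNSets := by
  intro fs ss mt mx nw w upd phi inp _hDom hPre
  obtain ⟨hndU, -, -, -⟩ := hPre
  unfold Spec_addAtmost4LogNSets addAtmost4LogNSets addAtmost4LogNSets_alt
  dsimp only
  have hrange : PySem.List.pyRange 0 mx 1
      = (List.range mx.toNat).map (fun (k : Nat) => (k : Int)) := by
    by_cases hmx : 0 ≤ mx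
    · conv_lhs => rw [show mx = ((mx.toNat : Nat) : Int) from (Int.toNat_of_nonneg hmx).symm]
      rw [PySem.List.pyRange_zero_natCast]
    · have h1 : mx.toNat = 0 := by omega
      have h2 : ¬ ((0 : Int) < mx) := by omega
      simp [PySem.List.pyRange, h2, h1]
  have hsplit : List.range mx.toNat
      = List.range' 0 (min mx.toNat mt.length)
        ++ List.range' (min mx.toNat mt.length) (mx.toNat - min mx.toNat mt.length) := by
    rw [List.range_eq_range']
    have := List.range'_append (s := 0) (m := min mx.toNat mt.length)
      (n := mx.toNat - min mx.toNat mt.length) (step := 1)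
    simp only [Nat.one_mul, Nat.zero_add] at this
    rw [this, Nat.add_sub_cancel' (Nat.min_le_left _ _)]
  have htail : ∀ j ∈ List.range' (min mx.toNat mt.length)
      (mx.toNat - min mx.toNat mt.length), mt.length ≤ j := by
    intro j hjm
    rcases List.mem_range'.mp hjm with ⟨i, hi, rfl⟩
    omega
  have hslice : PySem.List.slice mt none (some (max 0 mx)) = mt.take mx.toNat := by
    rw [PySem.List.slice_to mt (le_max_left 0 mx)]
    congr 1
    omega
  have htake : mt.take mx.toNat = mt.take (min mx.toNat mt.length) := by
    by_cases h : mx.toNat ≤ mt.length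
    · rw [Nat.min_eq_left h]
    · rw [List.take_of_length_le (by omega), Nat.min_eq_right (by omega), List.take_length]
  have hmain := pvMain mt (PySem.Dict.mk phi) (min mx.toNat mt.length) 0
    (fs, PySem.Dict.mk ss, PySem.Dict.mk upd, inp) (by omega)
  rw [List.drop_zero] at hmain
  have hgo := pvGoEq ((PySem.Dict.values (PySem.Dict.mk phi)).sum)
    (mt.take (min mx.toNat mt.length)) fs [] (PySem.Dict.mk ss) (PySem.Dict.mk upd) inp
    ((PySem.Dict.values (PySem.Dict.mk upd)).sum) hndU rfl
  rw [List.append_nil] at hgo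
  rw [hrange, hsplit, List.map_append, List.foldl_append,
    pvTailId mt (PySem.Dict.mk phi) _ htail, hmain, hslice, htake, hgo]
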